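-- pv_equiv track=rewrite | github.com/linyueCS-IT/PIV_Python_Lab | Test_1_review/exercise.py | prefixes
-- ===== SOURCE A (Python) =====
-- def prefixes(words: list) -> dict:
--     dict_char = {}
--     for word in words:
--         char = ""
--         for i in range(len(word)):
--             char += word[i]
--             if char in dict_char:
--                 dict_char[char] +=  1
--             else:
--                 dict_char[char] = 1
--
--     return dict_char
-- ===== SOURCE B (Python) =====
-- def prefixes(words: list) -> dict:
--     # Phase 1: collect the distinct non-empty prefixes in first-occurrence order.
--     order = []
--     for word in words:
--         for i in range(1, len(word) + 1):
--             p = word[:i]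
--             if p not in order:
--                 order.append(p)
--     # Phase 2: the count of a prefix is the number of words that start with it.
--     return {p: sum(1 for w in words if w.startswith(p)) for p in order}
-- ===== Notes on version B (the rewrite author's own statement) =====
-- stated objective: alternative
-- what changed: Instead of one incrementing-counter dict updated prefix by prefix, B first collects the distinct non-empty prefixes in first-occurrence order, then computes each prefix's count independently as the number of words that start with it.
import Mathlib
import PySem

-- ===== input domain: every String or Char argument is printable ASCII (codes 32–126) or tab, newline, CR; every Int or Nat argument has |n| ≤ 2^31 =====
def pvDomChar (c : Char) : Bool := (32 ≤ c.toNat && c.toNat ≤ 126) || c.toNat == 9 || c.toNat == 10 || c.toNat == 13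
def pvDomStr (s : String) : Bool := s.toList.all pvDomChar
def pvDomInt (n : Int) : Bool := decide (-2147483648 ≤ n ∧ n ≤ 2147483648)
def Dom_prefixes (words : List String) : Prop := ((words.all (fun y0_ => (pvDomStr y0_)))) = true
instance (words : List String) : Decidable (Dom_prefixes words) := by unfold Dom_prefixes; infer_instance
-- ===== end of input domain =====

-- B replaces A's single incrementing-counter dict by two passes: collect the distinct
-- non-empty prefixes in first-occurrence order, then count for each prefix the words
-- that start with it (objective: alternative decomposition, not faster).

-- ===== PORT A =====
-- loop body of A's inner 'for i in range(len(word))': state = (char, dict_char)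
def pvStepA (word : String) (st : List Char × PySem.Dict String Int) (i : Int) :
    List Char × PySem.Dict String Int :=
  -- char += word[i]; i ranges over range(len(word)), so the index is always valid
  let char := st.1 ++ (PySem.Str.pyGet? word i).toList
  let d := st.2
  if d.contains (String.ofList char) then
    (char, d.insert (String.ofList char) (d.getD (String.ofList char) 0 + 1))
  else
    (char, d.insert (String.ofList char) 1)

def prefixes (words : List String) : List (String × Int) :=
  (words.foldl
    (fun dict_char word =>
      ((PySem.List.pyRange 0 (PySem.Str.len word)).foldl (pvStepA word) ([], dict_char)).2)
    PySem.Dict.empty).items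

-- ===== PORT B =====
-- loop body of B's inner 'for i in range(1, len(word) + 1)': p = word[:i]; dedup-append
def pvStepB (word : String) (order : List String) (i : Int) : List String :=
  let p := PySem.Str.slice word none (some i)
  if order.contains p then order else order ++ [p]

-- sum(1 for w in words if w.startswith(p))
def pvCnt (words : List String) (p : String) : Int :=
  words.foldl (fun s w => s + if PySem.Str.startswith w p then 1 else 0) 0

def prefixes_alt (words : List String) : List (String × Int) :=
  -- order = the distinct prefixes in first-occurrence order (phase 1), then the dict comprehension (phase 2)
  ((words.foldl
      (fun order word =>
        (PySem.List.pyRange 1 (PySem.Str.len word + 1)).foldl (pvStepB word) order)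
      []).foldl (fun d p => d.insert p (pvCnt words p)) PySem.Dict.empty).items

-- ===== PRECONDITION & SPEC =====
def Spec_prefixes (words : List String) (out : List (String × Int)) : Prop := out = prefixes_alt words
instance (words : List String) (out : List (String × Int)) : Decidable (Spec_prefixes words out) := by unfold Spec_prefixes; infer_instance

-- ===== CLAIM (what is proved, stated in full; the proofs are below) =====
def Claim_equal_prefixes : Prop := ∀ (words : List String), Dom_prefixes words → Spec_prefixes words (prefixes words)

-- ===== LEMMAS AND PROOFS =====

-- the non-empty prefixes of a word, shortest first
def prefList (cs : List Char) : List String :=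
  (List.range cs.length).map (fun k => String.ofList (cs.take (k + 1)))

-- the stream of all (non-empty) prefixes of all words, in order of first production
def pvStream (ws : List String) : List String := ws.flatMap (fun w => prefList w.toList)

lemma ofList_inj {a b : List Char} (h : String.ofList a = String.ofList b) : a = b := by
  have := congrArg String.toList h
  simpa using this

lemma dict_step (d : PySem.Dict String Int) (k : String) :
    (if d.contains k then d.insert k (d.getD k 0 + 1) else d.insert k 1)
      = d.insert k (d.getD k 0 + 1) := by
  by_cases h : d.contains k
  · simp [h]
  · have hz : d.getD k 0 = 0 := by
      simp only [PySem.Dict.contains, List.any_eq_true, not_exists] at h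
      have hf : List.find? (fun p => p.1 == k) d.items = none := by
        rw [List.find?_eq_none]
        intro x hx hbe
        exact h x ⟨hx, hbe⟩
      simp [PySem.Dict.getD, PySem.Dict.get?, hf]
    simp [h, hz]

lemma innerA (word : String) (d : PySem.Dict String Int) (n : Nat)
    (hn : n ≤ word.toList.length) :
    (PySem.List.pyRange 0 (n : Int)).foldl (pvStepA word) ([], d)
      = (word.toList.take n,
         ((List.range n).map (fun k => String.ofList (word.toList.take (k + 1)))).foldl
           (fun d p => d.insert p (d.getD p 0 + 1)) d) := by
  induction n with
  | zero =>
    rw [PySem.List.pyRange_one_eq_nil (by simp)]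
    simp
  | succ n ih =>
    have hn' : n ≤ word.toList.length := Nat.le_of_succ_le hn
    have hcast : ((n + 1 : Nat) : Int) = (n : Int) + 1 := by push_cast; ring
    rw [hcast, PySem.List.pyRange_one_succ_right (by positivity), List.foldl_append,
        ih hn', List.range_succ, List.map_append, List.foldl_append]
    simp only [List.foldl_cons, List.foldl_nil, List.map_cons, List.map_nil]
    have hget : (PySem.Str.pyGet? word (n : Int)).toList = [word.toList[n]'(by omega)] := by
      rw [PySem.Str.pyGet?_natCast, List.getElem?_eq_getElem (by omega)]
      rfl
    have htake : word.toList.take n ++ (PySem.Str.pyGet? word (n : Int)).toList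
        = word.toList.take (n + 1) := by
      rw [hget, List.take_add_one, List.getElem?_eq_getElem (by omega)]
      rfl
    show pvStepA word (word.toList.take n, _) (n : Int) = _
    unfold pvStepA
    simp only [htake]
    rw [← apply_ite (Prod.mk (List.take (n + 1) word.toList))]
    exact congrArg _ (dict_step _ _)

lemma foldl_flatMap' {α β γ : Type} (ws : List α) (f : α → List β) (g : γ → β → γ) (init : γ) :
    ws.foldl (fun acc w => (f w).foldl g acc) init = (ws.flatMap f).foldl g init := by
  induction ws generalizing init with
  | nil => rfl
  | cons w ws ih => simp [List.flatMap_cons, List.foldl_append, ih]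

lemma A_eq (ws : List String) :
    prefixes ws = (PySem.Dict.counter (pvStream ws)).items := by
  unfold prefixes
  have hfun : (fun (d : PySem.Dict String Int) word =>
        ((PySem.List.pyRange 0 (PySem.Str.len word)).foldl (pvStepA word) ([], d)).2)
      = fun d word => (prefList word.toList).foldl (fun d p => d.insert p (d.getD p 0 + 1)) d := by
    funext d word
    rw [show PySem.Str.len word = ((word.toList.length : Nat) : Int) from by simp,
        innerA word d word.toList.length le_rfl]
    rfl
  rw [hfun, foldl_flatMap']
  rw [show List.flatMap (fun w => prefList w.toList) ws = pvStream ws from rfl,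
      PySem.Dict.foldl_insert_getD_add_one_eq_counter]

lemma innerB (word : String) (acc : List String) (n : Nat)
    (hn : n ≤ word.toList.length) :
    (PySem.List.pyRange 1 ((n : Int) + 1)).foldl (pvStepB word) acc
      = ((List.range n).map (fun k => String.ofList (word.toList.take (k + 1)))).foldl
          PySem.Set.add acc := by
  induction n with
  | zero =>
    rw [show ((0 : Nat) : Int) + 1 = 1 from by norm_num,
        PySem.List.pyRange_one_eq_nil le_rfl]
    simp
  | succ n ih =>
    have hn' : n ≤ word.toList.length := Nat.le_of_succ_le hn
    rw [show ((n + 1 : Nat) : Int) + 1 = ((n : Int) + 1) + 1 from by push_cast; ring,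
        PySem.List.pyRange_one_succ_right (by omega), List.foldl_append,
        ih hn', List.range_succ, List.map_append, List.foldl_append]
    simp only [List.foldl_cons, List.foldl_nil, List.map_cons, List.map_nil]
    have hp : PySem.Str.slice word none (some ((n : Int) + 1))
        = String.ofList (word.toList.take (n + 1)) := by
      have h1 : (PySem.Str.slice word none (some ((n : Int) + 1))).toList
          = word.toList.take (n + 1) := by
        rw [PySem.Str.toList_slice, PySem.Chars.slice_eq_listSlice,
            PySem.List.slice_to _ (by omega)]
        norm_num
      rw [← h1, String.ofList_toList]
    show pvStepB word _ ((n : Int) + 1) = _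
    simp only [pvStepB, PySem.Set.add, hp]
    rfl

lemma foldl_insert_items (ks : List String) (f : String → Int) (d : PySem.Dict String Int)
    (hnd : ks.Nodup) (hd : ∀ k ∈ ks, d.contains k = false) :
    (ks.foldl (fun d p => d.insert p (f p)) d).items
      = d.items ++ ks.map (fun p => (p, f p)) := by
  induction ks generalizing d with
  | nil => simp
  | cons k ks ih =>
    simp only [List.foldl_cons, List.map_cons]
    have hk : d.contains k = false := hd k (by simp)
    have hins : (d.insert k (f k)).items = d.items ++ [(k, f k)] := by
      simp [PySem.Dict.insert, hk]
    have hfresh : ∀ k' ∈ ks, (d.insert k (f k)).contains k' = false := by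
      intro k' hk'
      have hne : (k == k') = false := by
        have : k ≠ k' := fun he => (List.nodup_cons.1 hnd).1 (he ▸ hk')
        simpa using this
      have hcd : d.contains k' = false := hd k' (List.mem_cons_of_mem _ hk')
      simp only [PySem.Dict.contains] at hcd ⊢
      simp only [hins, List.any_append, List.any_cons, List.any_nil, hne, Bool.or_false]
      exact hcd
    rw [ih (d.insert k (f k)) (List.nodup_cons.1 hnd).2 hfresh, hins]
    simp

lemma B_eq (ws : List String) :
    prefixes_alt ws
      = (PySem.Set.ofList (pvStream ws)).map (fun p => (p, pvCnt ws p)) := by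
  unfold prefixes_alt
  have hfun : (fun (order : List String) word =>
        (PySem.List.pyRange 1 (PySem.Str.len word + 1)).foldl (pvStepB word) order)
      = fun order word => (prefList word.toList).foldl PySem.Set.add order := by
    funext order word
    rw [show PySem.Str.len word = ((word.toList.length : Nat) : Int) from by simp,
        innerB word order word.toList.length le_rfl]
    rfl
  rw [hfun, foldl_flatMap']
  rw [show List.foldl PySem.Set.add [] (List.flatMap (fun w => prefList w.toList) ws)
        = PySem.Set.ofList (pvStream ws) from rfl]
  rw [foldl_insert_items _ _ _ (PySem.Set.nodup_ofList _) (fun k _ => rfl)]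
  rfl

lemma nodup_prefList (cs : List Char) : (prefList cs).Nodup := by
  refine List.Nodup.map_on ?_ (List.nodup_range)
  intro k hk k' hk' he
  have := ofList_inj he
  have hlen := congrArg List.length this
  simp only [List.length_take] at hlen
  simp only [List.mem_range] at hk hk'
  omega

lemma mem_prefList {cs : List Char} {p : String} :
    p ∈ prefList cs ↔ p.toList ≠ [] ∧ p.toList <+: cs := by
  constructor
  · intro h
    simp only [prefList, List.mem_map, List.mem_range] at h
    obtain ⟨k, hk, rfl⟩ := h
    constructor
    · have : (cs.take (k + 1)).length = k + 1 := by
        simp only [List.length_take]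
        omega
      simp only [String.toList_ofList]
      intro hnil
      rw [hnil] at this
      simp at this
    · simp only [String.toList_ofList]
      exact List.take_prefix _ _
  · rintro ⟨hne, hpre⟩
    have hm : p.toList = cs.take p.toList.length := List.prefix_iff_eq_take.1 hpre
    have h1 : 1 ≤ p.toList.length := by
      cases hl : p.toList with
      | nil => exact absurd hl hne
      | cons a l => simp
    have h2 : p.toList.length ≤ cs.length := hpre.length_le
    simp only [prefList, List.mem_map, List.mem_range]
    refine ⟨p.toList.length - 1, by omega, ?_⟩
    rw [show p.toList.length - 1 + 1 = p.toList.length from by omega, ← hm,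
        String.ofList_toList]

lemma count_prefList (w : String) (p : String) (hp : p.toList ≠ []) :
    ((List.count p (prefList w.toList) : Nat) : Int)
      = if PySem.Str.startswith w p then 1 else 0 := by
  have hsw : PySem.Str.startswith w p = true ↔ p.toList <+: w.toList := by
    rw [PySem.Str.startswith_eq]
    exact PySem.Chars.startswith_iff _ _
  by_cases hpre : p.toList <+: w.toList
  · rw [List.count_eq_one_of_mem (nodup_prefList _) (mem_prefList.2 ⟨hp, hpre⟩),
        if_pos (hsw.2 hpre)]
    norm_num
  · rw [List.count_eq_zero_of_not_mem (fun hmem => hpre (mem_prefList.1 hmem).2),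
        if_neg (fun hb => hpre (hsw.1 hb))]
    norm_num

lemma cnt_eq (ws : List String) (p : String) (hp : p.toList ≠ []) (s : Int) :
    ws.foldl (fun s w => s + if PySem.Str.startswith w p then 1 else 0) s
      = s + ((List.count p (pvStream ws) : Nat) : Int) := by
  induction ws generalizing s with
  | nil => simp [pvStream]
  | cons w ws ih =>
    have hstream : pvStream (w :: ws) = prefList w.toList ++ pvStream ws := rfl
    rw [hstream, List.count_append, List.foldl_cons, ih]
    rw [← count_prefList w p hp]
    push_cast
    ring

lemma ne_nil_of_mem_stream {ws : List String} {p : String} (h : p ∈ pvStream ws) :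
    p.toList ≠ [] := by
  simp only [pvStream, List.mem_flatMap] at h
  obtain ⟨w, -, hw⟩ := h
  exact (mem_prefList.1 hw).1

-- ===== VERDICT (by name: the statement is the Claim_ definition above) =====
theorem prefixes_spec : Claim_equal_prefixes := by
  intro ws _
  show prefixes ws = prefixes_alt ws
  rw [A_eq, B_eq, PySem.Dict.items_counter]
  refine List.map_congr_left (fun p hp => ?_)
  have hm : p ∈ pvStream ws := (PySem.Set.mem_ofList _ _).1 hp
  have h0 := cnt_eq ws p (ne_nil_of_mem_stream hm) 0
  simp only [pvCnt, h0, zero_add]
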